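-- pv_equiv track=rewrite | github.com/ZhiyaoZhao/urban-spatial-structure | Self_organizing_clustering_process.py | return_temp_adjacent
-- ===== SOURCE A (Python) =====
-- def delet_repeat(list_of_node_of_edge_loop):
--
--     k = 0
--
--     for i in range(len(list_of_node_of_edge_loop)-1):
--
--         if list_of_node_of_edge_loop[i-k] == list_of_node_of_edge_loop[i+1-k]:
--
--             del list_of_node_of_edge_loop[i-k]
--
--             k = k + 1
--
--     return(list_of_node_of_edge_loop);
--
-- def return_temp_adjacent(index_list,indicator,list_of_node_of_edge_linear):
--
--     #the list 'temp' stores all the connections between the current index builidng to adjacent buildings, the connection is recorded in the form of a tuple（index，near）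
--     temp = []
--
--     for i in range(len(list_of_node_of_edge_linear)):
--
--         if index_list[indicator] in list_of_node_of_edge_linear[i]:
--
--             if index_list[indicator] == list_of_node_of_edge_linear[i][1]:
--
--                 replace = (list_of_node_of_edge_linear[i][1],list_of_node_of_edge_linear[i][0])
--
--                 temp.append(replace)
--
--             else:
--
--                 temp.append(list_of_node_of_edge_linear[i])
--     #deleting the adjacent and same elements
--     temp1 = delet_repeat(temp)
--
--     b = sorted(temp1,key=lambda x: (x[0], -x[1]))
--
--     temp1 = delet_repeat(b)
--
--     return(temp1);
-- ===== SOURCE B (Python) =====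
-- def return_temp_adjacent(index_list, indicator, list_of_node_of_edge_linear):
--     node = index_list[indicator]
--     seen = set()
--     for edge in list_of_node_of_edge_linear:
--         if node in edge:
--             seen.add((node, edge[0]) if node == edge[1] else edge)
--     return sorted(seen, key=lambda x: (x[0], -x[1]))
-- ===== Notes on version B (the rewrite author's own statement) =====
-- stated objective: simpler
-- what changed: Drops the index-juggling delet_repeat helper and its two adjacent-dedup passes: one pass normalizes matching edges into a set (dedup on the fly), then a single sort of the set yields the same unique sorted sequence.
-- outside the precondition, e.g. on return_temp_adjacent([1], 5, []): A returns [], B raises IndexError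
import Mathlib
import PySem

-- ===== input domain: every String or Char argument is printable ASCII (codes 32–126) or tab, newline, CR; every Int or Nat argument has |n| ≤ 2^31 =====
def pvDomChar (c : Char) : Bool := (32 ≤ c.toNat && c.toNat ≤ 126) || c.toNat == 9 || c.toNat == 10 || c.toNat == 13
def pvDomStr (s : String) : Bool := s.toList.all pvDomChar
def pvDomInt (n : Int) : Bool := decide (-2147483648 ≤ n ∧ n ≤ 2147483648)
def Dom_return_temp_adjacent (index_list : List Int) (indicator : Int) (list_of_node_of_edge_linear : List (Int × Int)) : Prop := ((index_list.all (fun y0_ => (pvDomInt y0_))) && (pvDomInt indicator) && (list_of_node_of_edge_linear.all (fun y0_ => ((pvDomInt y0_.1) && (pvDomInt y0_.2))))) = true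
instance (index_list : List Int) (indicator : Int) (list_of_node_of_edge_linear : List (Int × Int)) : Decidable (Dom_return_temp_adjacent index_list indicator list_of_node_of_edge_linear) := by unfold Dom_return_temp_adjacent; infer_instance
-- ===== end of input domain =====

-- B replaces A's delet_repeat helper and its two adjacent-dedup passes by one pass that
-- normalizes matching edges into a set, then a single sort (simpler; return value only).


-- ===== PORT A =====
-- delet_repeat's loop body: state (list, k), compare list[i-k] with list[i+1-k], del list[i-k].
-- The loop's indices i-k, i+1-k are always in range (proved by the loop invariant below),
-- so the `_, _` branch and the `.toNat` are unreachable where Python would raise.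
def pvDrBody : List (Int × Int) × Int → Int → List (Int × Int) × Int
  | (cur, k), i =>
    match PySem.List.pyGet? cur (i - k), PySem.List.pyGet? cur (i + 1 - k) with
    | some a, some b => if a = b then (cur.eraseIdx (i - k).toNat, k + 1) else (cur, k)
    | _, _ => (cur, k)

def pvDeletRepeat (l : List (Int × Int)) : List (Int × Int) :=
  ((PySem.List.pyRange 0 ((l.length : Int) - 1)).foldl pvDrBody (l, 0)).1

def return_temp_adjacent (index_list : List Int) (indicator : Int) (list_of_node_of_edge_linear : List (Int × Int)) : List (Int × Int) :=
  let temp := (PySem.List.pyRange 0 (list_of_node_of_edge_linear.length : Int)).foldl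
    (fun acc i =>
      match PySem.List.pyGet? list_of_node_of_edge_linear i with
      | none => acc              -- unreachable: i ∈ range(len)
      | some e =>
        match PySem.List.pyGet? index_list indicator with
        | none => acc            -- Python raises IndexError here (outside Pre_)
        | some node =>
          if node = e.1 ∨ node = e.2 then
            if node = e.2 then acc ++ [(e.2, e.1)] else acc ++ [e]
          else acc) []
  let temp1 := pvDeletRepeat temp
  let b := PySem.List.sorted2 temp1 (fun x => x.1) (fun x => -x.2)
  pvDeletRepeat b

-- ===== PORT B =====
def return_temp_adjacent_alt (index_list : List Int) (indicator : Int) (list_of_node_of_edge_linear : List (Int × Int)) : List (Int × Int) :=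
  match PySem.List.pyGet? index_list indicator with
  | none => []                   -- Python B raises IndexError here (outside Pre_)
  | some node =>
    let seen : PySem.Set (Int × Int) :=
      list_of_node_of_edge_linear.foldl
        (fun s e =>
          if node = e.1 ∨ node = e.2 then
            PySem.Set.add s (if node = e.2 then (node, e.1) else e)
          else s) PySem.Set.empty
    PySem.List.sorted2 seen (fun x => x.1) (fun x => -x.2)

-- ===== PRECONDITION & SPEC =====
-- Pre_ excludes an out-of-range indicator: there A raises IndexError whenever the edge list
-- is nonempty, and returns [] only because the loop body (and the lookup) never runs when it
-- is empty; B evaluates index_list[indicator] up front and raises IndexError on all of them.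
def Pre_return_temp_adjacent (index_list : List Int) (indicator : Int) (list_of_node_of_edge_linear : List (Int × Int)) : Prop :=
  PySem.Raise.InRange index_list.length indicator
instance (index_list : List Int) (indicator : Int) (list_of_node_of_edge_linear : List (Int × Int)) : Decidable (Pre_return_temp_adjacent index_list indicator list_of_node_of_edge_linear) := by unfold Pre_return_temp_adjacent; infer_instance

def pvWitness_return_temp_adjacent : List Int × Int × (List (Int × Int)) := ([5], 0, [(1, 5), (5, 2)])

def Spec_return_temp_adjacent (index_list : List Int) (indicator : Int) (list_of_node_of_edge_linear : List (Int × Int)) (out : List (Int × Int)) : Prop := out = return_temp_adjacent_alt index_list indicator list_of_node_of_edge_linear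
instance (index_list : List Int) (indicator : Int) (list_of_node_of_edge_linear : List (Int × Int)) (out : List (Int × Int)) : Decidable (Spec_return_temp_adjacent index_list indicator list_of_node_of_edge_linear out) := by unfold Spec_return_temp_adjacent; infer_instance

-- ===== CLAIM (what is proved, stated in full; the proofs are below) =====
def Claim_equal_return_temp_adjacent : Prop := ∀ (index_list : List Int) (indicator : Int) (list_of_node_of_edge_linear : List (Int × Int)), Dom_return_temp_adjacent index_list indicator list_of_node_of_edge_linear → Pre_return_temp_adjacent index_list indicator list_of_node_of_edge_linear → Spec_return_temp_adjacent index_list indicator list_of_node_of_edge_linear (return_temp_adjacent index_list indicator list_of_node_of_edge_linear)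

-- ===== LEMMAS AND PROOFS =====

-- the sort key as one lexicographic key (Python's tuple key (x[0], -x[1]))
def pvKey (x : Int × Int) : Lex (Int × Int) := toLex (x.1, -x.2)

theorem pvKey_inj : Function.Injective pvKey := by
  intro x y h
  have h' : (x.1, -x.2) = (y.1, -y.2) := toLex.injective h
  have h1 := congrArg Prod.fst h'
  have h2 := congrArg Prod.snd h'
  simp only at h1 h2
  exact Prod.ext h1 (by omega)

-- reference adjacent-dedup (keeps the later of each equal pair; values coincide)
def pvRemoveAdj : List (Int × Int) → List (Int × Int)
  | [] => []
  | [a] => [a]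
  | a :: b :: t => if a = b then pvRemoveAdj (b :: t) else a :: pvRemoveAdj (b :: t)

theorem pvRemoveAdj_cons_cons (a b : Int × Int) (t : List (Int × Int)) :
    pvRemoveAdj (a :: b :: t)
      = if a = b then pvRemoveAdj (b :: t) else a :: pvRemoveAdj (b :: t) := rfl

theorem mem_pvRemoveAdj (l : List (Int × Int)) : ∀ x, x ∈ pvRemoveAdj l ↔ x ∈ l := by
  induction l with
  | nil => simp [pvRemoveAdj]
  | cons a r ih =>
      cases r with
      | nil => simp [pvRemoveAdj]
      | cons b t =>
          intro x
          by_cases hab : a = b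
          · subst hab
            rw [pvRemoveAdj_cons_cons, if_pos rfl, ih x]
            simp
          · rw [pvRemoveAdj_cons_cons, if_neg hab]
            simp [ih x]

theorem sublist_pvRemoveAdj (l : List (Int × Int)) : (pvRemoveAdj l).Sublist l := by
  induction l with
  | nil => simp [pvRemoveAdj]
  | cons a r ih =>
      cases r with
      | nil => simp [pvRemoveAdj]
      | cons b t =>
          by_cases hab : a = b
          · subst hab
            rw [pvRemoveAdj_cons_cons, if_pos rfl]
            exact ih.trans (List.sublist_cons_self _ _)
          · rw [pvRemoveAdj_cons_cons, if_neg hab]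
            exact ih.cons₂ _

theorem head?_pvRemoveAdj (a : Int × Int) (t : List (Int × Int)) :
    (pvRemoveAdj (a :: t)).head? = some a := by
  induction t generalizing a with
  | nil => rfl
  | cons b t' ih =>
      by_cases hab : a = b
      · subst hab
        rw [pvRemoveAdj_cons_cons, if_pos rfl]
        exact ih a
      · rw [pvRemoveAdj_cons_cons, if_neg hab]
        rfl

theorem isChain_ne_pvRemoveAdj (l : List (Int × Int)) :
    (pvRemoveAdj l).IsChain (· ≠ ·) := by
  induction l with
  | nil => exact List.isChain_nil
  | cons a r ih =>
      cases r with
      | nil => exact List.isChain_singleton a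
      | cons b t =>
          by_cases hab : a = b
          · subst hab
            rw [pvRemoveAdj_cons_cons, if_pos rfl]
            exact ih
          · rw [pvRemoveAdj_cons_cons, if_neg hab]
            refine List.isChain_cons.mpr ⟨?_, ih⟩
            intro y hy
            rw [head?_pvRemoveAdj] at hy
            simp only [Option.mem_def, Option.some.injEq] at hy
            subst hy; exact hab

-- (p ++ x :: u).eraseIdx p.length = p ++ u
theorem eraseIdx_append_cons (p u : List (Int × Int)) (x : Int × Int) :
    (p ++ x :: u).eraseIdx p.length = p ++ u := by
  induction p with
  | nil => rfl
  | cons h t ih => simpa using ih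

theorem pvDrBody_step (cur : List (Int × Int)) (k i : Int) (x y : Int × Int)
    (h1 : PySem.List.pyGet? cur (i - k) = some x)
    (h2 : PySem.List.pyGet? cur (i + 1 - k) = some y) :
    pvDrBody (cur, k) i
      = if x = y then (cur.eraseIdx (i - k).toNat, k + 1) else (cur, k) := by
  simp only [pvDrBody, h1, h2]

-- loop invariant for delet_repeat: before iteration i the state is (p ++ r, k) with
-- i = p.length + k and r the unprocessed suffix
theorem pvDr_loop (r : List (Int × Int)) : ∀ (p : List (Int × Int)) (k : Int),
    ((PySem.List.pyRange ((p.length : Int) + k) ((p.length : Int) + k + (r.length : Int) - 1)).foldl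
        pvDrBody (p ++ r, k)).1 = p ++ pvRemoveAdj r := by
  induction r with
  | nil =>
      intro p k
      rw [PySem.List.pyRange_one_eq_nil
        (by simp only [List.length_nil]; push_cast; omega)]
      simp [pvRemoveAdj]
  | cons a r' ih =>
      cases r' with
      | nil =>
          intro p k
          rw [PySem.List.pyRange_one_eq_nil
            (by simp only [List.length_cons, List.length_nil]; push_cast; omega)]
          simp [pvRemoveAdj]
      | cons b t =>
          intro p k
          rw [PySem.List.pyRange_one_cons
            (by simp only [List.length_cons]; push_cast; omega)]
          rw [List.foldl_cons]
          have e1 : PySem.List.pyGet? (p ++ a :: b :: t) ((p.length : Int) + k - k)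
              = some a := by
            rw [show (p.length : Int) + k - k = (p.length : Int) by omega]
            exact PySem.List.pyGet?_append_length p (b :: t) a
          have e2 : PySem.List.pyGet? (p ++ a :: b :: t) ((p.length : Int) + k + 1 - k)
              = some b := by
            rw [show p ++ a :: b :: t = (p ++ [a]) ++ b :: t by simp,
              show (p.length : Int) + k + 1 - k = ((p ++ [a]).length : Int) by
                simp only [List.length_append, List.length_cons, List.length_nil]
                push_cast; omega]
            exact PySem.List.pyGet?_append_length (p ++ [a]) t b
          rw [pvDrBody_step (p ++ a :: b :: t) k ((p.length : Int) + k) a b e1 e2]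
          by_cases hab : a = b
          · subst hab
            rw [if_pos rfl]
            rw [show ((p.length : Int) + k - k).toNat = p.length by omega]
            rw [eraseIdx_append_cons]
            rw [show (p.length : Int) + k + ((a :: a :: t).length : Int) - 1
                = (p.length : Int) + (k + 1) + ((a :: t).length : Int) - 1 by
              simp only [List.length_cons]; push_cast; omega]
            rw [show (p.length : Int) + k + 1 = (p.length : Int) + (k + 1) by omega]
            rw [ih p (k + 1)]
            rw [pvRemoveAdj_cons_cons, if_pos rfl]
          · rw [if_neg hab]
            rw [show p ++ a :: b :: t = (p ++ [a]) ++ b :: t by simp]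
            rw [show (p.length : Int) + k + ((a :: b :: t).length : Int) - 1
                = (((p ++ [a]).length : Int)) + k + ((b :: t).length : Int) - 1 by
              simp only [List.length_append, List.length_cons, List.length_nil]
              push_cast; omega]
            rw [show (p.length : Int) + k + 1 = (((p ++ [a]).length : Int)) + k by
              simp only [List.length_append, List.length_cons, List.length_nil]
              push_cast; omega]
            rw [ih (p ++ [a]) k]
            rw [pvRemoveAdj_cons_cons, if_neg hab]
            simp

theorem pvDeletRepeat_eq (l : List (Int × Int)) : pvDeletRepeat l = pvRemoveAdj l := by
  unfold pvDeletRepeat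
  have h := pvDr_loop l [] 0
  simpa using h

-- fold over range(len(l)) indexing l with pyGet? is a fold over l
theorem foldl_pyRange_pyGet? {β : Type} (f : β → (Int × Int) → β) (l : List (Int × Int)) (init : β) :
    (PySem.List.pyRange 0 (l.length : Int)).foldl
      (fun acc i => match PySem.List.pyGet? l i with
        | none => acc
        | some e => f acc e) init = l.foldl f init := by
  suffices h : ∀ (r p : List (Int × Int)) (init : β),
      (PySem.List.pyRange (p.length : Int) ((p.length : Int) + (r.length : Int))).foldl
        (fun acc i => match PySem.List.pyGet? (p ++ r) i with
          | none => acc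
          | some e => f acc e) init = r.foldl f init by
    have := h l [] init
    simpa using this
  intro r
  induction r with
  | nil =>
      intro p init
      rw [PySem.List.pyRange_one_eq_nil
        (by simp only [List.length_nil]; push_cast; omega)]
      simp
  | cons e r' ih =>
      intro p init
      rw [PySem.List.pyRange_one_cons
        (by simp only [List.length_cons]; push_cast; omega)]
      rw [List.foldl_cons]
      simp only [PySem.List.pyGet?_append_length]
      rw [show p ++ e :: r' = (p ++ [e]) ++ r' by simp]
      rw [show (p.length : Int) + ((e :: r').length : Int)
          = ((p ++ [e]).length : Int) + ((r'.length : Int)) by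
        simp only [List.length_append, List.length_cons, List.length_nil]
        push_cast; omega]
      rw [show (p.length : Int) + 1 = ((p ++ [e]).length : Int) by
        simp only [List.length_append, List.length_cons, List.length_nil]
        push_cast; omega]
      exact ih (p ++ [e]) (f init e)

-- the normalized matching edges, in input order (both programs collect exactly these)
def pvNorm (node : Int) (e : Int × Int) : Int × Int := if node = e.2 then (e.2, e.1) else e

def pvT (node : Int) (edges : List (Int × Int)) : List (Int × Int) :=
  (edges.filter (fun e => decide (node = e.1 ∨ node = e.2))).map (pvNorm node)

theorem tempA_fold (node : Int) (edges : List (Int × Int)) :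
    edges.foldl (fun acc e =>
        if node = e.1 ∨ node = e.2 then
          if node = e.2 then acc ++ [(e.2, e.1)] else acc ++ [e]
        else acc) [] = pvT node edges := by
  have hcongr : edges.foldl (fun acc e =>
      if node = e.1 ∨ node = e.2 then
        if node = e.2 then acc ++ [(e.2, e.1)] else acc ++ [e]
      else acc) []
      = edges.foldl (fun acc e =>
        if node = e.1 ∨ node = e.2 then acc ++ [pvNorm node e] else acc) [] := by
    apply PySem.List.foldl_congr_mem
    intro acc e _
    by_cases h : node = e.1 ∨ node = e.2 <;> by_cases h2 : node = e.2 <;>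
      simp [h, h2, pvNorm]
  rw [hcongr, PySem.List.foldl_append_ite (fun e => node = e.1 ∨ node = e.2) (pvNorm node)]
  simp [pvT]

theorem sorted2_eq_sorted_pvKey (xs : List (Int × Int)) :
    PySem.List.sorted2 xs (fun x => x.1) (fun x => -x.2) = PySem.List.sorted xs pvKey := by
  rw [PySem.List.sorted_eq_foldl_insertBy]
  show xs.foldl (fun acc x => PySem.List.insertBy
      (fun a b => decide (a.1 < b.1) || (!decide (b.1 < a.1) && decide (-a.2 < -b.2))) x acc) []
    = xs.foldl (fun acc x => PySem.List.insertBy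
      (fun a b => decide (pvKey a < pvKey b)) x acc) []
  have hfun : (fun (a b : Int × Int) =>
      decide (a.1 < b.1) || (!decide (b.1 < a.1) && decide (-a.2 < -b.2)))
      = fun a b => decide (pvKey a < pvKey b) := by
    funext a b
    simp only [pvKey, Prod.Lex.toLex_lt_toLex]
    by_cases h1 : a.1 < b.1 <;> by_cases h2 : b.1 < a.1 <;>
      by_cases h3 : (-a.2 : Int) < -b.2 <;>
      simp [h1, h2, h3] <;> omega
  rw [hfun]

theorem pairwise_lt_of_pairwise_le_chain (l : List (Int × Int))
    (hle : l.Pairwise (fun a b => pvKey a ≤ pvKey b)) (hch : l.IsChain (· ≠ ·)) :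
    l.Pairwise (fun a b => pvKey a < pvKey b) := by
  induction l with
  | nil => exact List.Pairwise.nil
  | cons a t ih =>
      rw [List.pairwise_cons] at hle ⊢
      obtain ⟨h1, ht⟩ := hle
      have hch' := List.isChain_cons.mp hch
      refine ⟨?_, ih ht hch'.2⟩
      intro x hx
      refine lt_of_le_of_ne (h1 x hx) ?_
      intro he
      have hax : a = x := pvKey_inj he
      cases t with
      | nil => simp at hx
      | cons b t' =>
          have hab : a ≠ b := hch'.1 b rfl
          rcases List.mem_cons.mp hx with hxb | hxt'
          · exact hab (hxb ▸ hax)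
          · have hbx : pvKey b ≤ pvKey x := (List.pairwise_cons.mp ht).1 x hxt'
            have hab' : pvKey a ≤ pvKey b := h1 b List.mem_cons_self
            have : pvKey a = pvKey b := le_antisymm hab' (he ▸ hbx)
            exact hab (pvKey_inj this)

-- the heart of the equivalence: adjacent-dedup, sort, adjacent-dedup = sort of the set
theorem pvMain (T : List (Int × Int)) :
    pvRemoveAdj (PySem.List.sorted (pvRemoveAdj T) pvKey)
      = PySem.List.sorted (PySem.Set.ofList T) pvKey := by
  set C := pvRemoveAdj (PySem.List.sorted (pvRemoveAdj T) pvKey) with hC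
  have hpairC : C.Pairwise (fun a b => pvKey a < pvKey b) := by
    apply pairwise_lt_of_pairwise_le_chain
    · exact List.Pairwise.sublist (sublist_pvRemoveAdj _)
        (PySem.List.sorted_pairwise (pvRemoveAdj T) pvKey)
    · exact isChain_ne_pvRemoveAdj _
  have hnodupC : C.Nodup := hpairC.imp (fun h => by
    intro he; rw [he] at h; exact lt_irrefl _ h)
  have hperm : C.Perm (PySem.Set.ofList T) := by
    rw [List.perm_ext_iff_of_nodup hnodupC (PySem.Set.nodup_ofList T)]
    intro x
    rw [hC, mem_pvRemoveAdj, PySem.List.mem_sorted, mem_pvRemoveAdj,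
      PySem.Set.mem_ofList]
  exact (PySem.List.sorted_eq_of_perm_of_pairwise_lt (PySem.Set.ofList T) C pvKey
    hperm hpairC).symm

-- B's set is the set of pvT
theorem seenB_eq (node : Int) (edges : List (Int × Int)) :
    edges.foldl (fun s e =>
        if node = e.1 ∨ node = e.2 then
          PySem.Set.add s (if node = e.2 then (node, e.1) else e)
        else s) PySem.Set.empty = PySem.Set.ofList (pvT node edges) := by
  have hcongr : edges.foldl (fun s e =>
      if node = e.1 ∨ node = e.2 then
        PySem.Set.add s (if node = e.2 then (node, e.1) else e)
      else s) PySem.Set.empty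
      = edges.foldl (fun s e =>
        if node = e.1 ∨ node = e.2 then PySem.Set.add s (pvNorm node e) else s)
        PySem.Set.empty := by
    apply PySem.List.foldl_congr_mem
    intro s e _
    by_cases h : node = e.1 ∨ node = e.2 <;> by_cases h2 : node = e.2 <;>
      simp [h, h2, pvNorm]
  rw [hcongr,
    PySem.List.foldl_ite_eq_foldl_filter (fun e => node = e.1 ∨ node = e.2)
      (fun s e => PySem.Set.add s (pvNorm node e)) edges PySem.Set.empty,
    ← List.foldl_map, PySem.Set.ofList_eq_foldl]
  rfl

-- ===== VERDICT (by name: the statement is the Claim_ definition above) =====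
theorem return_temp_adjacent_spec : Claim_equal_return_temp_adjacent := by
  intro index_list indicator edges _ hPre
  unfold Spec_return_temp_adjacent
  cases hnode : PySem.List.pyGet? index_list indicator with
  | none =>
      exact absurd hPre ((PySem.List.pyGet?_eq_none_iff index_list indicator).mp hnode)
  | some node =>
      unfold return_temp_adjacent return_temp_adjacent_alt
      simp only [hnode]
      rw [foldl_pyRange_pyGet? (fun acc e =>
        if node = e.1 ∨ node = e.2 then
          if node = e.2 then acc ++ [(e.2, e.1)] else acc ++ [e]
        else acc) edges []]
      rw [tempA_fold node edges, seenB_eq node edges]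
      rw [pvDeletRepeat_eq, sorted2_eq_sorted_pvKey, sorted2_eq_sorted_pvKey,
        pvDeletRepeat_eq, pvMain]
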